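-- pv_equiv track=rewrite | github.com/KatarinaLouise/CSALGCM | Hierophant/dvds.py | solve
-- ===== SOURCE A (Python) =====
-- def solve(n, nums):
--     count = 0
--     prev = 0
--
--     for i in nums:
--         if i != prev + 1:
--             count += 1
--         else:
--             prev = i
--     return count
-- ===== SOURCE B (Python) =====
-- def solve(n, nums):
--     need = 1
--     rest = nums
--     while True:
--         try:
--             i = rest.index(need)
--         except ValueError:
--             break
--         need += 1
--         rest = rest[i + 1:]
--     return len(nums) - (need - 1)
-- ===== Notes on version B (the rewrite author's own statement) =====
-- stated objective: alternative
-- what changed: Instead of one pass counting mismatches against prev+1, B repeatedly searches the remaining suffix for the next needed value 1,2,3,... with list.index and returns len(nums) minus the number of values found.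
import Mathlib
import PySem

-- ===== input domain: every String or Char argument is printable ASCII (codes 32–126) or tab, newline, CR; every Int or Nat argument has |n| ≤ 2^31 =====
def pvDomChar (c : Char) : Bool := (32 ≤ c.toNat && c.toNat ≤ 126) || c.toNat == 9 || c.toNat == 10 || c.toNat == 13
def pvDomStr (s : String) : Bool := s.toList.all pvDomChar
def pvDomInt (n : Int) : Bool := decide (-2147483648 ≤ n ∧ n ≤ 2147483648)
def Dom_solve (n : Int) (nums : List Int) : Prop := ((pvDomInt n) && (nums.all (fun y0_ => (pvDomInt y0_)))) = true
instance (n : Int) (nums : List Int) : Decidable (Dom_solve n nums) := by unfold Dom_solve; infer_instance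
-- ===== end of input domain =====

-- B finds the greedy 1,2,3,... subsequence by repeated list.index searches on the shrinking suffix instead of A's single mismatch-counting pass; alternative decomposition, same cost.
-- ===== PORT A =====
def solve (n : Int) (nums : List Int) : Int :=
  (nums.foldl (fun (s : Int × Int) i =>
    if i ≠ s.2 + 1 then (s.1 + 1, s.2) else (s.1, i)) (0, 0)).1

-- ===== PORT B =====
-- the while-loop of Source B: rest shrinks by at least one element per iteration
def solveAltGo (need : Int) (rest : List Int) : Int :=
  match h : PySem.List.index? rest need with
  | none => need - 1
  | some i => solveAltGo (need + 1) (rest.drop (i + 1))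
termination_by rest.length
decreasing_by
  have := PySem.List.getElem_of_index?_eq_some h
  obtain ⟨hk, _⟩ := this
  simp
  omega

def solve_alt (n : Int) (nums : List Int) : Int :=
  (nums.length : Int) - (solveAltGo 1 nums - 0)

-- ===== PRECONDITION & SPEC =====
def Spec_solve (n : Int) (nums : List Int) (out : Int) : Prop := out = solve_alt n nums
instance (n : Int) (nums : List Int) (out : Int) : Decidable (Spec_solve n nums out) := by unfold Spec_solve; infer_instance

-- ===== CLAIM (what is proved, stated in full; the proofs are below) =====
def Claim_equal_solve : Prop := ∀ (n : Int) (nums : List Int), Dom_solve n nums → Spec_solve n nums (solve n nums)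

-- ===== LEMMAS AND PROOFS =====

-- ===== VERDICT (by name: the statement is the Claim_ definition above) =====
-- unfolding equations for the search loop
theorem solveAltGo_none (need : Int) (rest : List Int)
    (hn : PySem.List.index? rest need = none) : solveAltGo need rest = need - 1 := by
  rw [solveAltGo.eq_def]
  split
  · rfl
  · rename_i i hs
    rw [hn] at hs
    simp at hs

theorem solveAltGo_some (need : Int) (rest : List Int) (i : Nat)
    (hs : PySem.List.index? rest need = some i) :
    solveAltGo need rest = solveAltGo (need + 1) (rest.drop (i + 1)) := by
  rw [solveAltGo.eq_def]
  split
  · rename_i hn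
    rw [hn] at hs
    simp at hs
  · rename_i j hj
    rw [hs] at hj
    cases hj
    rfl

-- index? skips a non-matching head
theorem solveAltGo_cons_ne (need h : Int) (t : List Int) (hne : h ≠ need) :
    solveAltGo need (h :: t) = solveAltGo need t := by
  cases hidx : PySem.List.index? t need with
  | none =>
      have h1 : PySem.List.index? (h :: t) need = none := by
        rw [PySem.List.index?_cons_of_ne t hne, hidx]; rfl
      rw [solveAltGo_none _ _ h1, solveAltGo_none _ _ hidx]
  | some i =>
      have h1 : PySem.List.index? (h :: t) need = some (i + 1) := by
        rw [PySem.List.index?_cons_of_ne t hne, hidx]; rfl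
      rw [solveAltGo_some _ _ _ h1, solveAltGo_some _ _ _ hidx]
      simp [List.drop_succ_cons]

theorem solveAltGo_cons_self (need : Int) (t : List Int) :
    solveAltGo need (need :: t) = solveAltGo (need + 1) t := by
  rw [solveAltGo_some _ _ _ (PySem.List.index?_cons_self need t)]
  simp

-- the loop invariant connecting A's fold state (count, prev) with B's search loop
theorem main_inv (l : List Int) : ∀ (c p : Int),
    (l.foldl (fun (s : Int × Int) i =>
      if i ≠ s.2 + 1 then (s.1 + 1, s.2) else (s.1, i)) (c, p)).1
    = c + (l.length : Int) - (solveAltGo (p + 1) l - p) := by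
  induction l with
  | nil =>
      intro c p
      rw [solveAltGo_none _ _ (by simp [PySem.List.index?_eq_idxOf?])]
      simp
  | cons h t ih =>
      intro c p
      simp only [List.foldl_cons]
      by_cases hh : h = p + 1
      · subst hh
        rw [if_neg (by simp)]
        rw [ih]
        rw [solveAltGo_cons_self]
        simp only [List.length_cons]
        push_cast
        ring
      · rw [if_pos hh]
        rw [ih]
        rw [solveAltGo_cons_ne _ _ _ hh]
        simp only [List.length_cons]
        push_cast
        ring

theorem solve_spec : Claim_equal_solve := by
  intro n nums _
  unfold Spec_solve solve solve_alt
  rw [main_inv nums 0 0]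
  ring
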